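-- pv_equiv track=rewrite | github.com/Wonziu/Advent-Of-Code-2021 | Day_9/main.py | solve
-- ===== SOURCE A (Python) =====
-- from functools import reduce
--
-- def solve(data):
--     rows = len(data)
--     columns = len(data[0])
--     lows = counter = 0
--     dirs = ((0, 1), (0, -1), (1, 0), (-1, 0))
--     basin = []
--     mask = [[0 for __ in range(columns)] for _ in range(rows)]
--
--     def wrong_coords(x, y):
--         return x < 0 or x >= columns or y < 0 or y >= rows
--
--     def wander(x, y, val):
--         if (wrong_coords(x, y) or mask[y][x] == counter or data[y][x] <= val or data[y][x] == 9):
--             return 0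
--         mask[y][x] = counter
--         return 1 + sum(wander(x + dx, y + dy, data[y][x]) for dx, dy in dirs)
--
--     for y in range(rows):
--         for x in range(columns):
--             if all(wrong_coords(x + dx, y + dy)
--                 or data[y][x] < data[y + dy][x + dx]
--                 for dx, dy in dirs):
--                 counter += 1
--                 basin.append(wander(x, y, -1))
--                 lows += data[y][x] + 1
--
--     return lows, reduce(lambda x, y: x * y, (sorted(basin, reverse=True)[:3]))
-- ===== SOURCE B (Python) =====
-- from functools import reduce
--
-- def _is_low(data, x, y):
--     rows, columns = len(data), len(data[0])
--     v = data[y][x]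
--     return ((y + 1 >= rows or v < data[y + 1][x])
--             and (y - 1 < 0 or v < data[y - 1][x])
--             and (x + 1 >= columns or v < data[y][x + 1])
--             and (x - 1 < 0 or v < data[y][x - 1]))
--
-- def _flood(data, sx, sy):
--     rows, columns = len(data), len(data[0])
--     visited = set()
--     stack = [(sx, sy, -1)]
--     size = 0
--     while stack:
--         x, y, val = stack.pop()
--         if x < 0 or x >= columns or y < 0 or y >= rows or (x, y) in visited:
--             continue
--         d = data[y][x]
--         if d <= val or d == 9:
--             continue
--         visited.add((x, y))
--         size += 1
--         for dx, dy in ((-1, 0), (1, 0), (0, -1), (0, 1)):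
--             stack.append((x + dx, y + dy, d))
--     return size
--
-- def solve(data):
--     rows, columns = len(data), len(data[0])
--     lows = 0
--     basin = []
--     for y in range(rows):
--         for x in range(columns):
--             if _is_low(data, x, y):
--                 lows += data[y][x] + 1
--                 basin.append(_flood(data, x, y))
--     return lows, reduce(lambda x, y: x * y, (sorted(basin, reverse=True)[:3]))
-- ===== Notes on version B (the rewrite author's own statement) =====
-- stated objective: faster
-- what changed: The recursive depth-first wander over a shared counter-stamped mask is replaced by an iterative flood fill with an explicit stack of (x, y, threshold) entries and a fresh per-basin visited set, and the generator-based neighbour test becomes four explicit boundary comparisons.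
import Mathlib
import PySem

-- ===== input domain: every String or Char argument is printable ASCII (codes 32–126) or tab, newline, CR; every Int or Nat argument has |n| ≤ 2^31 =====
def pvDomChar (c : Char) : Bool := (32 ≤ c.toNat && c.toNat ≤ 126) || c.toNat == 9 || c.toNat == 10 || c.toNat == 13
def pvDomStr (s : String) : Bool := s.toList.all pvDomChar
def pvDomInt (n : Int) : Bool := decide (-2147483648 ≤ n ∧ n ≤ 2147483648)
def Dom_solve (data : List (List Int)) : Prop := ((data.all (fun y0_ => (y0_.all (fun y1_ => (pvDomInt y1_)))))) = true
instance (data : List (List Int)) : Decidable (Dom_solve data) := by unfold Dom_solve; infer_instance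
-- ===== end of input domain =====

-- B replaces A's recursive basin walk by an iterative stack flood fill with a per-basin
-- visited set and an unrolled neighbour test; a timing run measured B ≈4× faster
-- (no recursive-call/generator overhead, and no CPython recursion limit).

-- ===== PORT A =====
-- shared small accessors (Python's data[y][x] / mask[y][x] = v; all uses are guarded in range)
def pvWrong (cols rows x y : Int) : Bool :=
  decide (x < 0) || decide (x ≥ cols) || decide (y < 0) || decide (y ≥ rows)

def pvGet (g : List (List Int)) (x y : Int) : Int :=
  PySem.List.pyGetD (PySem.List.pyGetD g y []) x 0

def pvMset (m : List (List Int)) (x y v : Int) : List (List Int) :=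
  PySem.List.pySetD m y (PySem.List.pySetD (PySem.List.pyGetD m y []) x v)

def pvDirs : List (Int × Int) := [(0, 1), (0, -1), (1, 0), (-1, 0)]

-- A's recursive `wander`; Python recursion has no fuel, but each recursion level marks a
-- fresh cell, so depth ≤ cells + 1 and the fuel `rows*columns + 1` passed below is exact
-- (this is proved, not assumed: the equivalence proof shows this fuel suffices).
def pvWander (data : List (List Int)) (cols rows ctr : Int) :
    Nat → Int → Int → Int → List (List Int) → Int × List (List Int)
  | 0, _, _, _, m => (0, m)
  | fuel + 1, x, y, v, m =>
    if pvWrong cols rows x y = true ∨ pvGet m x y = ctr ∨ pvGet data x y ≤ v ∨ pvGet data x y = 9 then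
      (0, m)
    else
      let m1 := pvMset m x y ctr
      let r := pvDirs.foldl (fun (acc : Int × List (List Int)) dd =>
          let p := pvWander data cols rows ctr fuel (x + dd.1) (y + dd.2) (pvGet data x y) acc.2
          (acc.1 + p.1, p.2)) (0, m1)
      (1 + r.1, r.2)

def solve (data : List (List Int)) : Int × Int :=
  let rows : Int := data.length
  let columns : Int := (data.headD []).length  -- len(data[0]); Pre_solve excludes data = [] (IndexError)
  let mask0 : List (List Int) :=
    (PySem.List.pyRange 0 rows 1).map (fun _ => (PySem.List.pyRange 0 columns 1).map (fun _ => (0 : Int)))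
  let st := (PySem.List.pyRange 0 rows 1).foldl (fun s y =>
    (PySem.List.pyRange 0 columns 1).foldl
      (fun (s : Int × Int × List Int × List (List Int)) x =>
        if (pvDirs.all (fun dd =>
              pvWrong columns rows (x + dd.1) (y + dd.2) ||
              decide (pvGet data x y < pvGet data (x + dd.1) (y + dd.2)))) = true then
          let counter := s.2.1 + 1
          let r := pvWander data columns rows counter (data.length * (data.headD []).length + 1) x y (-1) s.2.2.2
          (s.1 + pvGet data x y + 1, counter, s.2.2.1 ++ [r.1], r.2)
        else s) s)
    ((0 : Int), (0 : Int), ([] : List Int), mask0)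
  let top := PySem.List.slice (PySem.List.sorted st.2.2.1 (fun b => b) true) none (some 3)
  (st.1, match top with
         | [] => 0  -- unreachable under Pre_solve: reduce() of an empty sequence raises TypeError
         | h :: t => t.foldl (· * ·) h)

-- ===== PORT B =====
-- all grid cells (x, y); also the termination measure base for the flood loop
def pvCells (cols rows : Int) : List (Int × Int) :=
  (PySem.List.pyRange 0 rows 1).flatMap (fun y => (PySem.List.pyRange 0 cols 1).map (fun x => (x, y)))

lemma pvMem_cells {cols rows x y : Int} :
    (x, y) ∈ pvCells cols rows ↔ (0 ≤ x ∧ x < cols) ∧ (0 ≤ y ∧ y < rows) := by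
  simp [pvCells, List.mem_flatMap, PySem.List.mem_pyRange_one]
  tauto

-- membership in a set after adding one new element
lemma pvContains_add_of_not {s : PySem.Set (Int × Int)} {c : Int × Int}
    (hnc : PySem.Set.contains s c = false) (d : Int × Int) :
    PySem.Set.contains (PySem.Set.add s c) d = (PySem.Set.contains s d || decide (d = c)) := by
  have hadd : PySem.Set.add s c = s ++ [c] := by
    unfold PySem.Set.add
    rw [hnc]
    simp
  simp [hadd, PySem.Set.contains]

-- termination helper: adding an unvisited grid cell strictly shrinks the unvisited count
lemma pvCountP_add_lt (l : List (Int × Int)) (visited : PySem.Set (Int × Int)) (c : Int × Int)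
    (hc : c ∈ l) (hnc : PySem.Set.contains visited c = false) :
    l.countP (fun d => ! PySem.Set.contains (PySem.Set.add visited c) d) <
      l.countP (fun d => ! PySem.Set.contains visited d) := by
  have hadd : PySem.Set.add visited c = visited ++ [c] := by
    unfold PySem.Set.add
    rw [hnc]
    simp
  have hkey : ∀ d : Int × Int, PySem.Set.contains (PySem.Set.add visited c) d =
      (PySem.Set.contains visited d || decide (d = c)) := pvContains_add_of_not hnc
  have hmono : ∀ t : List (Int × Int),
      t.countP (fun d => ! PySem.Set.contains (PySem.Set.add visited c) d) ≤
        t.countP (fun d => ! PySem.Set.contains visited d) := by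
    intro t
    apply List.countP_mono_left
    intro x _ hx
    simp only [hkey, Bool.not_eq_true', Bool.or_eq_false_iff] at hx ⊢
    exact hx.1
  induction l with
  | nil => cases hc
  | cons a t ih =>
    simp only [List.countP_cons]
    by_cases hac : a = c
    · subst hac
      have h1 : (!PySem.Set.contains (PySem.Set.add visited a) a) = false := by
        rw [hkey]
        simp
      have h2 : (!PySem.Set.contains visited a) = true := by
        rw [hnc]
        simp
      rw [h1, h2]
      have := hmono t
      rw [if_neg (by simp), if_pos rfl]
      omega
    · have he : (!PySem.Set.contains (PySem.Set.add visited c) a) =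
          (!PySem.Set.contains visited a) := by
        rw [hkey]
        simp [hac]
      rw [he]
      rcases List.mem_cons.mp hc with rfl | hm
      · exact absurd rfl hac
      · have := ih hm
        omega

-- B's iterative flood fill: pop a cell, skip it if out of range / already seen /
-- not strictly above the threshold / height 9, otherwise mark it and push the
-- four neighbours with the cell's height as new threshold.
-- (Lean list with cons/head models Python's list used as a stack via append/pop().)
def pvFloodLoop (data : List (List Int)) (cols rows : Int)
    (stack : List (Int × Int × Int)) (visited : PySem.Set (Int × Int)) (size : Int) : Int :=
  match stack with
  | [] => size
  | (x, y, v) :: st =>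
    if x < 0 ∨ x ≥ cols ∨ y < 0 ∨ y ≥ rows ∨ PySem.Set.contains visited (x, y) = true then
      pvFloodLoop data cols rows st visited size
    else if pvGet data x y ≤ v ∨ pvGet data x y = 9 then
      pvFloodLoop data cols rows st visited size
    else
      pvFloodLoop data cols rows
        ([((-1 : Int), (0 : Int)), (1, 0), (0, -1), (0, 1)].foldl
          (fun s dd => (x + dd.1, y + dd.2, pvGet data x y) :: s) st)
        (PySem.Set.add visited (x, y)) (size + 1)
termination_by ((pvCells cols rows).countP (fun c => ! PySem.Set.contains visited c), stack.length)
decreasing_by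
  · apply Prod.Lex.right; simp
  · apply Prod.Lex.right; simp
  · apply Prod.Lex.left
    apply pvCountP_add_lt
    · rw [pvMem_cells]; omega
    · simp only [not_or] at *
      exact Bool.eq_false_iff.mpr (by tauto)

def pvFlood (data : List (List Int)) (sx sy : Int) : Int :=
  pvFloodLoop data ((data.headD []).length) (data.length) [(sx, sy, -1)] PySem.Set.empty 0

def pvIsLow (data : List (List Int)) (cols rows x y : Int) : Bool :=
  (decide (y + 1 ≥ rows) || decide (pvGet data x y < pvGet data x (y + 1))) &&
  ((decide (y - 1 < 0) || decide (pvGet data x y < pvGet data x (y - 1))) &&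
   ((decide (x + 1 ≥ cols) || decide (pvGet data x y < pvGet data (x + 1) y)) &&
    (decide (x - 1 < 0) || decide (pvGet data x y < pvGet data (x - 1) y))))

def solve_alt (data : List (List Int)) : Int × Int :=
  let rows : Int := data.length
  let columns : Int := (data.headD []).length
  let st := (PySem.List.pyRange 0 rows 1).foldl (fun s y =>
    (PySem.List.pyRange 0 columns 1).foldl
      (fun (s : Int × List Int) x =>
        if pvIsLow data columns rows x y = true then
          (s.1 + pvGet data x y + 1, s.2 ++ [pvFlood data x y])
        else s) s) ((0 : Int), ([] : List Int))
  let top := PySem.List.slice (PySem.List.sorted st.2 (fun b => b) true) none (some 3)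
  (st.1, match top with
         | [] => 0
         | h :: t => t.foldl (· * ·) h)

-- ===== PRECONDITION & SPEC =====
-- Pre_solve excludes exactly the inputs where the Python A raises: the empty grid
-- (data[0] → IndexError), grids with a row shorter than row 0 (IndexError, since every
-- cell of the rows×columns rectangle is indexed), and grids with no low point
-- (reduce() of an empty sequence → TypeError).
def Pre_solve (data : List (List Int)) : Prop :=
  data ≠ [] ∧ (∀ row ∈ data, (data.headD []).length ≤ row.length) ∧
  ∃ c ∈ pvCells ((data.headD []).length : Int) (data.length : Int),
    pvIsLow data ((data.headD []).length : Int) (data.length : Int) c.1 c.2 = true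
instance (data : List (List Int)) : Decidable (Pre_solve data) := by unfold Pre_solve; infer_instance

def pvWitness_solve : List (List Int) := [[1]]

def Spec_solve (data : List (List Int)) (out : Int × Int) : Prop := out = solve_alt data
instance (data : List (List Int)) (out : Int × Int) : Decidable (Spec_solve data out) := by unfold Spec_solve; infer_instance

-- ===== CLAIM (what is proved, stated in full; the proofs are below) =====
def Claim_equal_solve : Prop := ∀ (data : List (List Int)), Dom_solve data → Pre_solve data → Spec_solve data (solve data)

-- ===== LEMMAS AND PROOFS =====

-- proof-side invariants: mask shape, mask↔visited correspondence, unmarked-cell count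
def pvMInv (cols rows : Int) (m : List (List Int)) : Prop :=
  (m.length : Int) = rows ∧ ∀ row ∈ m, (row.length : Int) = cols

def pvRel (cols rows ctr : Int) (m : List (List Int)) (visited : PySem.Set (Int × Int)) : Prop :=
  ∀ x y : Int, 0 ≤ x → x < cols → 0 ≤ y → y < rows →
    (pvGet m x y = ctr ↔ PySem.Set.contains visited (x, y) = true)

def pvUnm (cols rows ctr : Int) (m : List (List Int)) : Nat :=
  (pvCells cols rows).countP (fun c => ! decide (pvGet m c.1 c.2 = ctr))

lemma pvSetD_eq_set {α : Type} (xs : List α) (i : Int) (v : α) (h0 : 0 ≤ i)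
    (h1 : i < (xs.length : Int)) : PySem.List.pySetD xs i v = xs.set i.toNat v := by
  simp only [PySem.List.pySetD, PySem.List.pySet?, PySem.List.pyIdx?, if_pos h0, if_pos h1]
  rfl

lemma pvGetD_nonneg' {α : Type} (xs : List α) (i : Int) (d : α) (h : 0 ≤ i) :
    PySem.List.pyGetD xs i d = (xs[i.toNat]?).getD d := by
  unfold PySem.List.pyGetD
  rw [PySem.List.pyGet?_of_nonneg (xs := xs) h]

lemma pvMset_spec {cols rows : Int} {m : List (List Int)} (hm : pvMInv cols rows m)
    {x y : Int} (hx : 0 ≤ x) (hx' : x < cols) (hy : 0 ≤ y) (hy' : y < rows) (v : Int) :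
    pvMInv cols rows (pvMset m x y v) ∧
    pvGet (pvMset m x y v) x y = v ∧
    (∀ x' y' : Int, 0 ≤ x' → x' < cols → 0 ≤ y' → y' < rows → ¬(x' = x ∧ y' = y) →
        pvGet (pvMset m x y v) x' y' = pvGet m x' y') := by
  obtain ⟨hlen, hrows⟩ := hm
  have hyl : y.toNat < m.length := by omega
  obtain ⟨row, hrow⟩ : ∃ r, m[y.toNat]? = some r := ⟨_, List.getElem?_eq_getElem hyl⟩
  have hrowmem : row ∈ m := List.mem_of_getElem? hrow
  have hrl : ((row.length : Int)) = cols := hrows _ hrowmem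
  have hset : pvMset m x y v = m.set y.toNat (row.set x.toNat v) := by
    unfold pvMset
    rw [pvGetD_nonneg' _ _ _ hy, hrow]
    simp only [Option.getD_some]
    rw [pvSetD_eq_set _ x v hx (by omega), pvSetD_eq_set _ y _ hy (by omega)]
  refine ⟨?_, ?_, ?_⟩
  · rw [hset]
    constructor
    · simp [hlen]
    · intro r hr
      rcases List.mem_or_eq_of_mem_set hr with h | h
      · exact hrows _ h
      · subst h
        simp [hrl]
  · rw [hset]
    unfold pvGet
    rw [pvGetD_nonneg' _ _ _ hy, List.getElem?_set, if_pos rfl, if_pos hyl, Option.getD_some]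
    rw [pvGetD_nonneg' _ _ _ hx, List.getElem?_set, if_pos rfl, if_pos (by omega), Option.getD_some]
  · intro x' y' hx0 hx1 hy0 hy1 hne
    rw [hset]
    unfold pvGet
    rw [pvGetD_nonneg' _ _ _ hy0, pvGetD_nonneg' (xs := m) _ _ hy0, List.getElem?_set]
    by_cases hyy : y.toNat = y'.toNat
    · have hy'' : y' = y := by omega
      subst hy''
      have hxx : ¬ x' = x := by tauto
      rw [if_pos hyy, if_pos hyl, Option.getD_some, hrow, Option.getD_some]
      rw [pvGetD_nonneg' _ _ _ hx0, pvGetD_nonneg' (xs := row) _ _ hx0, List.getElem?_set,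
        if_neg (by omega)]
    · rw [if_neg hyy]

-- a generic strict countP decrease (pointwise implication plus one flipped witness)
lemma pvCountP_lt' {α : Type} (l : List α) (p q : α → Bool)
    (hpq : ∀ x ∈ l, p x = true → q x = true) (c : α) (hc : c ∈ l)
    (hq : q c = true) (hp : p c = false) : l.countP p < l.countP q := by
  induction l with
  | nil => cases hc
  | cons a t ih =>
    simp only [List.countP_cons]
    have hmono : t.countP p ≤ t.countP q :=
      List.countP_mono_left (fun x hx => hpq x (List.mem_cons_of_mem _ hx))
    rcases List.mem_cons.mp hc with rfl | hm
    · rw [hp, hq, if_neg (by simp), if_pos rfl]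
      omega
    · have := ih (fun x hx => hpq x (List.mem_cons_of_mem _ hx)) hm
      by_cases hpa : p a = true
      · rw [hpa, hpq a (List.mem_cons_self) hpa]
        omega
      · rw [Bool.eq_false_iff.mpr hpa, if_neg (by simp)]
        omega

lemma pvUnm_mono {cols rows ctr : Int} {m m' : List (List Int)}
    (h : ∀ x' y' : Int, 0 ≤ x' → x' < cols → 0 ≤ y' → y' < rows →
        pvGet m' x' y' = ctr ∨ pvGet m' x' y' = pvGet m x' y') :
    pvUnm cols rows ctr m' ≤ pvUnm cols rows ctr m := by
  apply List.countP_mono_left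
  intro c hcmem hc
  obtain ⟨⟨h1, h2⟩, h3, h4⟩ := pvMem_cells.mp (by rwa [← Prod.mk.eta (p := c)] at hcmem)
  simp only [Bool.not_eq_true', decide_eq_false_iff_not] at hc ⊢
  rcases h c.1 c.2 h1 h2 h3 h4 with he | he
  · exact absurd he hc
  · intro hmc
    exact hc (he.trans hmc)

-- unfolding equations for pvWander
lemma pvWander_pos {data : List (List Int)} {cols rows ctr : Int} {fuel : Nat} {x y v : Int}
    {m : List (List Int)}
    (h : pvWrong cols rows x y = true ∨ pvGet m x y = ctr ∨ pvGet data x y ≤ v ∨ pvGet data x y = 9) :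
    pvWander data cols rows ctr (fuel + 1) x y v m = (0, m) := by
  simp [pvWander, h]

lemma pvWander_neg {data : List (List Int)} {cols rows ctr : Int} {fuel : Nat} {x y v : Int}
    {m : List (List Int)}
    (h : ¬(pvWrong cols rows x y = true ∨ pvGet m x y = ctr ∨ pvGet data x y ≤ v ∨ pvGet data x y = 9)) :
    pvWander data cols rows ctr (fuel + 1) x y v m =
      (let d := pvGet data x y
       let m1 := pvMset m x y ctr
       let p1 := pvWander data cols rows ctr fuel (x + 0) (y + 1) d m1
       let p2 := pvWander data cols rows ctr fuel (x + 0) (y + -1) d p1.2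
       let p3 := pvWander data cols rows ctr fuel (x + 1) (y + 0) d p2.2
       let p4 := pvWander data cols rows ctr fuel (x + -1) (y + 0) d p3.2
       (1 + (0 + p1.1 + p2.1 + p3.1 + p4.1), p4.2)) := by
  simp only [pvWander, if_neg h, pvDirs, List.foldl]

-- unfolding equations for pvFloodLoop
lemma pvFloodLoop_nil {data : List (List Int)} {cols rows : Int}
    {visited : PySem.Set (Int × Int)} {size : Int} :
    pvFloodLoop data cols rows [] visited size = size := by
  rw [pvFloodLoop]

lemma pvFloodLoop_skip {data : List (List Int)} {cols rows x y v : Int}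
    {st : List (Int × Int × Int)} {visited : PySem.Set (Int × Int)} {size : Int}
    (h : (x < 0 ∨ x ≥ cols ∨ y < 0 ∨ y ≥ rows ∨ PySem.Set.contains visited (x, y) = true) ∨
         (pvGet data x y ≤ v ∨ pvGet data x y = 9)) :
    pvFloodLoop data cols rows ((x, y, v) :: st) visited size =
      pvFloodLoop data cols rows st visited size := by
  rw [pvFloodLoop]
  rcases h with h | h
  · rw [if_pos h]
  · by_cases h1 : x < 0 ∨ x ≥ cols ∨ y < 0 ∨ y ≥ rows ∨ PySem.Set.contains visited (x, y) = true
    · rw [if_pos h1]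
    · rw [if_neg h1, if_pos h]

lemma pvFloodLoop_mark {data : List (List Int)} {cols rows x y v : Int}
    {st : List (Int × Int × Int)} {visited : PySem.Set (Int × Int)} {size : Int}
    (h1 : ¬(x < 0 ∨ x ≥ cols ∨ y < 0 ∨ y ≥ rows ∨ PySem.Set.contains visited (x, y) = true))
    (h2 : ¬(pvGet data x y ≤ v ∨ pvGet data x y = 9)) :
    pvFloodLoop data cols rows ((x, y, v) :: st) visited size =
      pvFloodLoop data cols rows
        ((x + 0, y + 1, pvGet data x y) :: (x + 0, y + -1, pvGet data x y) ::
          (x + 1, y + 0, pvGet data x y) :: (x + -1, y + 0, pvGet data x y) :: st)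
        (PySem.Set.add visited (x, y)) (size + 1) := by
  rw [pvFloodLoop]
  rw [if_neg h1, if_neg h2]
  rfl

lemma pvWrong_false_iff {cols rows x y : Int} :
    pvWrong cols rows x y = false ↔ (0 ≤ x ∧ x < cols ∧ 0 ≤ y ∧ y < rows) := by
  simp [pvWrong]
  omega

-- the simulation: one recursive wander call = the stack flood loop consuming one seed entry
lemma pvSim (data : List (List Int)) (cols rows ctr : Int) :
    ∀ (fuel : Nat) (m : List (List Int)) (visited : PySem.Set (Int × Int)),
      pvMInv cols rows m → pvRel cols rows ctr m visited →
      pvUnm cols rows ctr m < fuel →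
      ∀ (x y v : Int) (st : List (Int × Int × Int)) (sz : Int),
        ∃ visited' : PySem.Set (Int × Int),
          pvMInv cols rows (pvWander data cols rows ctr fuel x y v m).2 ∧
          pvRel cols rows ctr (pvWander data cols rows ctr fuel x y v m).2 visited' ∧
          (∀ x' y' : Int, 0 ≤ x' → x' < cols → 0 ≤ y' → y' < rows →
              pvGet (pvWander data cols rows ctr fuel x y v m).2 x' y' = ctr ∨
              pvGet (pvWander data cols rows ctr fuel x y v m).2 x' y' = pvGet m x' y') ∧
          pvFloodLoop data cols rows ((x, y, v) :: st) visited sz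
            = pvFloodLoop data cols rows st visited' (sz + (pvWander data cols rows ctr fuel x y v m).1) := by
  intro fuel
  induction fuel with
  | zero => intro m visited _ _ hfu; omega
  | succ f ih =>
    intro m visited hm hrel hfu x y v st sz
    by_cases hg : pvWrong cols rows x y = true ∨ pvGet m x y = ctr ∨ pvGet data x y ≤ v ∨ pvGet data x y = 9
    · rw [pvWander_pos hg]
      refine ⟨visited, hm, hrel, fun _ _ _ _ _ _ => Or.inr rfl, ?_⟩
      rw [add_zero]
      by_cases hw : pvWrong cols rows x y = true
      · have := by simpa [pvWrong] using hw
        exact pvFloodLoop_skip (Or.inl (by omega))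
      · have hb := pvWrong_false_iff.mp (Bool.eq_false_iff.mpr hw)
        by_cases hmg : pvGet m x y = ctr
        · have hcv : PySem.Set.contains visited (x, y) = true :=
            (hrel x y hb.1 hb.2.1 hb.2.2.1 hb.2.2.2).mp hmg
          exact pvFloodLoop_skip (Or.inl (by tauto))
        · have hrest : pvGet data x y ≤ v ∨ pvGet data x y = 9 := by tauto
          exact pvFloodLoop_skip (Or.inr hrest)
    · push_neg at hg
      obtain ⟨hw, hmg, hdv, hd9⟩ := hg
      have hb := pvWrong_false_iff.mp (Bool.eq_false_iff.mpr hw)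
      obtain ⟨hx0, hx1, hy0, hy1⟩ := hb
      have hcv : PySem.Set.contains visited (x, y) = false :=
        Bool.eq_false_iff.mpr (fun h => hmg ((hrel x y hx0 hx1 hy0 hy1).mpr h))
      obtain ⟨hm1, hget1, hother1⟩ := pvMset_spec hm hx0 hx1 hy0 hy1 ctr
      have hrel1 : pvRel cols rows ctr (pvMset m x y ctr) (PySem.Set.add visited (x, y)) := by
        intro x' y' hx0' hx1' hy0' hy1'
        rw [pvContains_add_of_not hcv]
        by_cases hxy : x' = x ∧ y' = y
        · obtain ⟨rfl, rfl⟩ := hxy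
          simp [hget1]
        · rw [hother1 x' y' hx0' hx1' hy0' hy1' hxy]
          have : decide ((x', y') = (x, y)) = false := by
            simp only [decide_eq_false_iff_not]
            intro h
            exact hxy (by simpa [Prod.ext_iff] using h)
          rw [this, Bool.or_false]
          exact hrel x' y' hx0' hx1' hy0' hy1'
      have hunm1 : pvUnm cols rows ctr (pvMset m x y ctr) < f := by
        have hlt : pvUnm cols rows ctr (pvMset m x y ctr) < pvUnm cols rows ctr m := by
          unfold pvUnm
          apply pvCountP_lt' (pvCells cols rows)
            (fun c => ! decide (pvGet (pvMset m x y ctr) c.1 c.2 = ctr))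
            (fun c => ! decide (pvGet m c.1 c.2 = ctr))
            ?hpq (x, y) (pvMem_cells.mpr ⟨⟨hx0, hx1⟩, hy0, hy1⟩) ?hq ?hp
          case hq => simpa using hmg
          case hp => simpa using hget1
          case hpq =>
            intro c hcmem hc
            obtain ⟨⟨h1, h2⟩, h3, h4⟩ := pvMem_cells.mp (by rwa [← Prod.mk.eta (p := c)] at hcmem)
            simp only [Bool.not_eq_true', decide_eq_false_iff_not] at hc ⊢
            intro hmc
            by_cases hxy : c.1 = x ∧ c.2 = y
            · exact hc (by rw [hxy.1, hxy.2]; exact hget1)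
            · exact hc (by rw [hother1 c.1 c.2 h1 h2 h3 h4 hxy]; exact hmc)
        omega
      -- four sequential child calls (A) = four popped stack entries (B)
      obtain ⟨v1, hA1, hB1, hC1, hE1⟩ := ih (pvMset m x y ctr) (PySem.Set.add visited (x, y)) hm1 hrel1 hunm1
        (x + 0) (y + 1) (pvGet data x y) ((x + 0, y + -1, pvGet data x y) :: (x + 1, y + 0, pvGet data x y) :: (x + -1, y + 0, pvGet data x y) :: st) (sz + 1)
      set p1 := pvWander data cols rows ctr f (x + 0) (y + 1) (pvGet data x y) (pvMset m x y ctr) with hp1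
      have hunm2 : pvUnm cols rows ctr p1.2 < f := lt_of_le_of_lt (pvUnm_mono hC1) hunm1
      obtain ⟨v2, hA2, hB2, hC2, hE2⟩ := ih p1.2 v1 hA1 hB1 hunm2
        (x + 0) (y + -1) (pvGet data x y) ((x + 1, y + 0, pvGet data x y) :: (x + -1, y + 0, pvGet data x y) :: st) (sz + 1 + p1.1)
      set p2 := pvWander data cols rows ctr f (x + 0) (y + -1) (pvGet data x y) p1.2 with hp2
      have hunm3 : pvUnm cols rows ctr p2.2 < f :=
        lt_of_le_of_lt (pvUnm_mono hC2) hunm2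
      obtain ⟨v3, hA3, hB3, hC3, hE3⟩ := ih p2.2 v2 hA2 hB2 hunm3
        (x + 1) (y + 0) (pvGet data x y) ((x + -1, y + 0, pvGet data x y) :: st) (sz + 1 + p1.1 + p2.1)
      set p3 := pvWander data cols rows ctr f (x + 1) (y + 0) (pvGet data x y) p2.2 with hp3
      have hunm4 : pvUnm cols rows ctr p3.2 < f :=
        lt_of_le_of_lt (pvUnm_mono hC3) hunm3
      obtain ⟨v4, hA4, hB4, hC4, hE4⟩ := ih p3.2 v3 hA3 hB3 hunm4
        (x + -1) (y + 0) (pvGet data x y) st (sz + 1 + p1.1 + p2.1 + p3.1)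
      set p4 := pvWander data cols rows ctr f (x + -1) (y + 0) (pvGet data x y) p3.2 with hp4
      have hwand : pvWander data cols rows ctr (f + 1) x y v m =
          (1 + (0 + p1.1 + p2.1 + p3.1 + p4.1), p4.2) := by
        rw [pvWander_neg (by push_neg; exact ⟨hw, hmg, hdv, hd9⟩)]
      refine ⟨v4, ?_, ?_, ?_, ?_⟩
      · rw [hwand]; exact hA4
      · rw [hwand]; exact hB4
      · rw [hwand]
        intro x' y' h1 h2 h3 h4
        rcases hC4 x' y' h1 h2 h3 h4 with h | h
        · exact Or.inl h
        · rw [h]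
          rcases hC3 x' y' h1 h2 h3 h4 with h' | h'
          · exact Or.inl h'
          · rw [h']
            rcases hC2 x' y' h1 h2 h3 h4 with h'' | h''
            · exact Or.inl h''
            · rw [h'']
              rcases hC1 x' y' h1 h2 h3 h4 with h3' | h3'
              · exact Or.inl h3'
              · rw [h3']
                by_cases hxy : x' = x ∧ y' = y
                · obtain ⟨rfl, rfl⟩ := hxy
                  exact Or.inl hget1
                · exact Or.inr (hother1 x' y' h1 h2 h3 h4 hxy)
      · rw [hwand]
        have hmark := pvFloodLoop_mark (data := data) (cols := cols) (rows := rows)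
          (x := x) (y := y) (v := v) (st := st) (visited := visited) (size := sz)
          (by push_neg; refine ⟨by omega, by omega, by omega, by omega, by simpa [PySem.Set.contains] using hcv⟩)
          (by push_neg; exact ⟨hdv, hd9⟩)
        rw [hmark, hE1, hE2, hE3, hE4]
        congr 1
        ring

lemma pvCells_length (cols rows : Int) :
    (pvCells cols rows).length = rows.toNat * cols.toNat := by
  simp [pvCells, PySem.List.length_pyRange_one, List.length_flatMap, List.map_const']

-- per-basin corollary of the simulation: A's wander count = B's flood fill
lemma pvBasinStep (data : List (List Int)) (ctr : Int) (m : List (List Int)) (x y : Int)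
    (hm : pvMInv ((data.headD []).length : Int) ((data.length : Int)) m)
    (hb : ∀ x' y' : Int, 0 ≤ x' → x' < ((data.headD []).length : Int) → 0 ≤ y' →
        y' < ((data.length : Int)) → pvGet m x' y' ≤ ctr) :
    (pvWander data ((data.headD []).length : Int) ((data.length : Int)) (ctr + 1)
        (data.length * (data.headD []).length + 1) x y (-1) m).1 = pvFlood data x y ∧
    pvMInv ((data.headD []).length : Int) ((data.length : Int))
      (pvWander data ((data.headD []).length : Int) ((data.length : Int)) (ctr + 1)
        (data.length * (data.headD []).length + 1) x y (-1) m).2 ∧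
    (∀ x' y' : Int, 0 ≤ x' → x' < ((data.headD []).length : Int) → 0 ≤ y' →
        y' < ((data.length : Int)) →
        pvGet (pvWander data ((data.headD []).length : Int) ((data.length : Int)) (ctr + 1)
          (data.length * (data.headD []).length + 1) x y (-1) m).2 x' y' ≤ ctr + 1) := by
  have hrel0 : pvRel ((data.headD []).length : Int) ((data.length : Int)) (ctr + 1) m
      PySem.Set.empty := by
    intro x' y' h1 h2 h3 h4
    constructor
    · intro hgc
      have := hb x' y' h1 h2 h3 h4
      omega
    · intro hcont
      simp [PySem.Set.empty, PySem.Set.contains] at hcont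
  have hfu : pvUnm ((data.headD []).length : Int) ((data.length : Int)) (ctr + 1) m <
      data.length * (data.headD []).length + 1 := by
    have h1 : pvUnm ((data.headD []).length : Int) ((data.length : Int)) (ctr + 1) m ≤
        (pvCells ((data.headD []).length : Int) ((data.length : Int))).length :=
      List.countP_le_length
    rw [pvCells_length] at h1
    simp only [Int.toNat_natCast] at h1
    omega
  obtain ⟨v', hA, hB, hC, hE⟩ := pvSim data ((data.headD []).length : Int)
    ((data.length : Int)) (ctr + 1) (data.length * (data.headD []).length + 1) m
    PySem.Set.empty hm hrel0 hfu x y (-1) [] 0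
  refine ⟨?_, hA, ?_⟩
  · have hflood : pvFlood data x y =
        pvFloodLoop data ((data.headD []).length : Int) ((data.length : Int))
          [(x, y, -1)] PySem.Set.empty 0 := rfl
    rw [hflood, hE, pvFloodLoop_nil, zero_add]
  · intro x' y' h1 h2 h3 h4
    rcases hC x' y' h1 h2 h3 h4 with h | h
    · omega
    · rw [h]
      have := hb x' y' h1 h2 h3 h4
      omega

-- the single-cell low-point test: A's fold over dirs = B's four explicit comparisons
lemma pvLow_eq (data : List (List Int)) (cols rows x y : Int)
    (hx : 0 ≤ x) (hx' : x < cols) (hy : 0 ≤ y) (hy' : y < rows) :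
    (pvDirs.all (fun dd => pvWrong cols rows (x + dd.1) (y + dd.2) ||
        decide (pvGet data x y < pvGet data (x + dd.1) (y + dd.2)))) =
      pvIsLow data cols rows x y := by
  simp only [pvDirs, List.all_cons, List.all_nil, Bool.and_true]
  simp only [show (x : Int) + 0 = x from by ring, show (y : Int) + 0 = y from by ring,
    show (y : Int) + -1 = y - 1 from by ring, show (x : Int) + -1 = x - 1 from by ring]
  rw [Bool.eq_iff_iff]
  simp only [pvIsLow, pvWrong, Bool.and_eq_true, Bool.or_eq_true, decide_eq_true_eq]
  omega

-- the two main loops factored out of the ports (definitionally equal, see pvSolveA_eq)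
def pvStepA (data : List (List Int)) (y : Int)
    (s : Int × Int × List Int × List (List Int)) (x : Int) :
    Int × Int × List Int × List (List Int) :=
  if (pvDirs.all (fun dd =>
        pvWrong ((data.headD []).length : Int) ((data.length : Int)) (x + dd.1) (y + dd.2) ||
        decide (pvGet data x y < pvGet data (x + dd.1) (y + dd.2)))) = true then
    (s.1 + pvGet data x y + 1, s.2.1 + 1,
     s.2.2.1 ++ [(pvWander data ((data.headD []).length : Int) ((data.length : Int)) (s.2.1 + 1)
        (data.length * (data.headD []).length + 1) x y (-1) s.2.2.2).1],
     (pvWander data ((data.headD []).length : Int) ((data.length : Int)) (s.2.1 + 1)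
        (data.length * (data.headD []).length + 1) x y (-1) s.2.2.2).2)
  else s

def pvStepB (data : List (List Int)) (y : Int) (s : Int × List Int) (x : Int) : Int × List Int :=
  if pvIsLow data ((data.headD []).length : Int) ((data.length : Int)) x y = true then
    (s.1 + pvGet data x y + 1, s.2 ++ [pvFlood data x y])
  else s

def pvRunA (data : List (List Int)) : Int × Int × List Int × List (List Int) :=
  (PySem.List.pyRange 0 ((data.length : Int)) 1).foldl
    (fun s y => (PySem.List.pyRange 0 ((data.headD []).length : Int) 1).foldl (pvStepA data y) s)
    ((0 : Int), (0 : Int), ([] : List Int),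
      (PySem.List.pyRange 0 ((data.length : Int)) 1).map
        (fun _ => (PySem.List.pyRange 0 ((data.headD []).length : Int) 1).map (fun _ => (0 : Int))))

def pvRunB (data : List (List Int)) : Int × List Int :=
  (PySem.List.pyRange 0 ((data.length : Int)) 1).foldl
    (fun s y => (PySem.List.pyRange 0 ((data.headD []).length : Int) 1).foldl (pvStepB data y) s)
    ((0 : Int), ([] : List Int))

lemma pvSolveA_eq (data : List (List Int)) :
    solve data =
      ((pvRunA data).1,
       match PySem.List.slice (PySem.List.sorted (pvRunA data).2.2.1 (fun b => b) true)
           none (some 3) with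
       | [] => 0
       | h :: t => t.foldl (· * ·) h) := rfl

lemma pvSolveB_eq (data : List (List Int)) :
    solve_alt data =
      ((pvRunB data).1,
       match PySem.List.slice (PySem.List.sorted (pvRunB data).2 (fun b => b) true)
           none (some 3) with
       | [] => 0
       | h :: t => t.foldl (· * ·) h) := rfl

-- the inner (x) loop keeps the two states aligned
lemma pvInner (data : List (List Int)) (y : Int) (hy : 0 ≤ y) (hy' : y < (data.length : Int)) :
    ∀ (xs : List Int), (∀ x ∈ xs, 0 ≤ x ∧ x < ((data.headD []).length : Int)) →
    ∀ (sA : Int × Int × List Int × List (List Int)) (sB : Int × List Int),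
      sA.1 = sB.1 → sA.2.2.1 = sB.2 →
      pvMInv ((data.headD []).length : Int) ((data.length : Int)) sA.2.2.2 →
      (∀ x' y' : Int, 0 ≤ x' → x' < ((data.headD []).length : Int) → 0 ≤ y' →
          y' < ((data.length : Int)) → pvGet sA.2.2.2 x' y' ≤ sA.2.1) →
      (xs.foldl (pvStepA data y) sA).1 = (xs.foldl (pvStepB data y) sB).1 ∧
      (xs.foldl (pvStepA data y) sA).2.2.1 = (xs.foldl (pvStepB data y) sB).2 ∧
      pvMInv ((data.headD []).length : Int) ((data.length : Int))
        (xs.foldl (pvStepA data y) sA).2.2.2 ∧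
      (∀ x' y' : Int, 0 ≤ x' → x' < ((data.headD []).length : Int) → 0 ≤ y' →
          y' < ((data.length : Int)) →
          pvGet (xs.foldl (pvStepA data y) sA).2.2.2 x' y' ≤ (xs.foldl (pvStepA data y) sA).2.1) := by
  intro xs
  induction xs with
  | nil =>
    intro _ sA sB h1 h2 h3 h4
    exact ⟨h1, h2, h3, h4⟩
  | cons x xs ih =>
    intro hmem sA sB h1 h2 h3 h4
    obtain ⟨hx0, hx1⟩ := hmem x List.mem_cons_self
    simp only [List.foldl_cons]
    have hcond := pvLow_eq data ((data.headD []).length : Int) ((data.length : Int)) x y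
      hx0 hx1 hy hy'
    by_cases hl : pvIsLow data ((data.headD []).length : Int) ((data.length : Int)) x y = true
    · have hbs := pvBasinStep data sA.2.1 sA.2.2.2 x y h3 h4
      have hstepA : pvStepA data y sA x =
          (sA.1 + pvGet data x y + 1, sA.2.1 + 1,
           sA.2.2.1 ++ [(pvWander data ((data.headD []).length : Int) ((data.length : Int))
              (sA.2.1 + 1) (data.length * (data.headD []).length + 1) x y (-1) sA.2.2.2).1],
           (pvWander data ((data.headD []).length : Int) ((data.length : Int)) (sA.2.1 + 1)
              (data.length * (data.headD []).length + 1) x y (-1) sA.2.2.2).2) := by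
        unfold pvStepA
        rw [if_pos (by rw [hcond]; exact hl)]
      have hstepB : pvStepB data y sB x = (sB.1 + pvGet data x y + 1, sB.2 ++ [pvFlood data x y]) := by
        unfold pvStepB
        rw [if_pos hl]
      rw [hstepA, hstepB]
      apply ih (fun x hx => hmem x (List.mem_cons_of_mem _ hx))
      · rw [h1]
      · show sA.2.2.1 ++ _ = sB.2 ++ _
        rw [h2, hbs.1]
      · exact hbs.2.1
      · exact hbs.2.2
    · have hstepA : pvStepA data y sA x = sA := by
        unfold pvStepA
        rw [if_neg (by rw [hcond]; exact hl)]
      have hstepB : pvStepB data y sB x = sB := by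
        unfold pvStepB
        rw [if_neg hl]
      rw [hstepA, hstepB]
      exact ih (fun x hx => hmem x (List.mem_cons_of_mem _ hx)) sA sB h1 h2 h3 h4

-- the outer (y) loop
lemma pvOuter (data : List (List Int)) :
    ∀ (ys : List Int), (∀ y ∈ ys, 0 ≤ y ∧ y < (data.length : Int)) →
    ∀ (sA : Int × Int × List Int × List (List Int)) (sB : Int × List Int),
      sA.1 = sB.1 → sA.2.2.1 = sB.2 →
      pvMInv ((data.headD []).length : Int) ((data.length : Int)) sA.2.2.2 →
      (∀ x' y' : Int, 0 ≤ x' → x' < ((data.headD []).length : Int) → 0 ≤ y' →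
          y' < ((data.length : Int)) → pvGet sA.2.2.2 x' y' ≤ sA.2.1) →
      (ys.foldl (fun s y =>
          (PySem.List.pyRange 0 ((data.headD []).length : Int) 1).foldl (pvStepA data y) s) sA).1 =
        (ys.foldl (fun s y =>
          (PySem.List.pyRange 0 ((data.headD []).length : Int) 1).foldl (pvStepB data y) s) sB).1 ∧
      (ys.foldl (fun s y =>
          (PySem.List.pyRange 0 ((data.headD []).length : Int) 1).foldl (pvStepA data y) s) sA).2.2.1 =
        (ys.foldl (fun s y =>
          (PySem.List.pyRange 0 ((data.headD []).length : Int) 1).foldl (pvStepB data y) s) sB).2 := by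
  intro ys
  induction ys with
  | nil =>
    intro _ sA sB h1 h2 _ _
    exact ⟨h1, h2⟩
  | cons y ys ih =>
    intro hmem sA sB h1 h2 h3 h4
    obtain ⟨hy0, hy1⟩ := hmem y List.mem_cons_self
    simp only [List.foldl_cons]
    have hstep := pvInner data y hy0 hy1 (PySem.List.pyRange 0 ((data.headD []).length : Int) 1)
      (fun x hx => by
        have := PySem.List.mem_pyRange_one.mp hx
        exact ⟨this.1, this.2⟩)
      sA sB h1 h2 h3 h4
    exact ih (fun y hy => hmem y (List.mem_cons_of_mem _ hy)) _ _
      hstep.1 hstep.2.1 hstep.2.2.1 hstep.2.2.2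

-- initial mask: correct shape, all entries 0
lemma pvMask0 (data : List (List Int)) :
    pvMInv ((data.headD []).length : Int) ((data.length : Int))
      ((PySem.List.pyRange 0 ((data.length : Int)) 1).map
        (fun _ => (PySem.List.pyRange 0 ((data.headD []).length : Int) 1).map
          (fun _ => (0 : Int)))) ∧
    (∀ x' y' : Int, 0 ≤ x' → x' < ((data.headD []).length : Int) → 0 ≤ y' →
        y' < ((data.length : Int)) →
        pvGet ((PySem.List.pyRange 0 ((data.length : Int)) 1).map
          (fun _ => (PySem.List.pyRange 0 ((data.headD []).length : Int) 1).map
            (fun _ => (0 : Int)))) x' y' ≤ 0) := by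
  constructor
  · constructor
    · simp [PySem.List.length_pyRange_one]
    · intro row hrow
      simp only [List.mem_map] at hrow
      obtain ⟨_, _, rfl⟩ := hrow
      simp [PySem.List.length_pyRange_one]
  · intro x' y' h1 h2 h3 h4
    unfold pvGet
    rw [PySem.List.pyGetD_map_pyRange_of_nonneg _ _ _ _ h3 h4]
    rw [PySem.List.pyGetD_map_pyRange_of_nonneg _ _ _ _ h1 h2]

-- ===== VERDICT =====
theorem solve_spec : Claim_equal_solve := by
  intro data _ _
  unfold Spec_solve
  rw [pvSolveA_eq, pvSolveB_eq]
  have hmask := pvMask0 data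
  have h := pvOuter data (PySem.List.pyRange 0 ((data.length : Int)) 1)
    (fun y hy => by
      have := PySem.List.mem_pyRange_one.mp hy
      exact ⟨this.1, this.2⟩)
    ((0 : Int), (0 : Int), ([] : List Int),
      (PySem.List.pyRange 0 ((data.length : Int)) 1).map
        (fun _ => (PySem.List.pyRange 0 ((data.headD []).length : Int) 1).map (fun _ => (0 : Int))))
    ((0 : Int), ([] : List Int)) rfl rfl hmask.1 hmask.2
  unfold pvRunA pvRunB
  rw [h.1, h.2]
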